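-- pv_equiv track=rewrite | github.com/heerpark/Algorithm | 프로그래머스/2/60058. 괄호 변환/괄호 변환.py | solution
-- ===== SOURCE A (Python) =====
-- def split_u_v(p):
--     if not p:
--         return "", ""
--     count_open = 0
--     count_close = 0
--     for i in range(len(p)):
--         if p[i] == '(':
--             count_open += 1
--         else:
--             count_close += 1
--         if count_open == count_close:
--             u = p[:i+1]
--             v = p[i+1:]
--             return u, v
--     return "", ""
--
-- def is_correct(p):
--     if not p:
--         return True
--     count = 0
--     for i in p:
--         if i == '(':
--             count += 1
--         else:
--             if count == 0:
--                 return False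
--             else:
--                 count -= 1
--     if count == 0:
--         return True
--     else:
--         return False
--
-- def get_bet_rev(p):
--     if not p:
--         return p
--     res = ''
--     if len(p) > 2:
--         for i in range(1, len(p) - 1):
--             if p[i] == '(':
--                 res = res + ')'
--             else:
--                 res = res + '('
--     return res
--
-- def solution(p):
--     if not p:
--         return p
--     answer = ''
--     u, v = split_u_v(p)
--     if is_correct(u):
--         answer = u + solution(v)
--     else:
--         answer = '('
--         answer = answer + solution(v)
--         answer = answer + ')'
--         answer = answer + get_bet_rev(u)
--     return answer
-- ===== SOURCE B (Python) =====
-- def solution(p):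
--     left = ""
--     right = ""
--     while p:
--         # first balanced-count prefix u, remainder v (single running balance)
--         bal = 0
--         u, v = "", ""
--         for i, c in enumerate(p):
--             bal += 1 if c == '(' else -1
--             if bal == 0:
--                 u, v = p[:i + 1], p[i + 1:]
--                 break
--         # u is "correct" iff the running balance never dips below zero and ends at zero
--         bal = 0
--         ok = True
--         for c in u:
--             bal += 1 if c == '(' else -1
--             ok = ok and bal >= 0
--         if ok and bal == 0:
--             left += u
--         else:
--             left += '('
--             right = ')' + ''.join(')' if c == '(' else '(' for c in u[1:-1]) + right
--         p = v
--     return left + right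
-- ===== Notes on version B (the rewrite author's own statement) =====
-- stated objective: simpler
-- what changed: Replaced A's recursion (and its three helper passes with two counters, early-return scan and index-loop interior reversal) by a single iterative while-loop over the remaining string that maintains two accumulators left/right, using a one-counter prefix split, a never-negative balance scan, and a slice+comprehension for the flipped interior.
import Mathlib
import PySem

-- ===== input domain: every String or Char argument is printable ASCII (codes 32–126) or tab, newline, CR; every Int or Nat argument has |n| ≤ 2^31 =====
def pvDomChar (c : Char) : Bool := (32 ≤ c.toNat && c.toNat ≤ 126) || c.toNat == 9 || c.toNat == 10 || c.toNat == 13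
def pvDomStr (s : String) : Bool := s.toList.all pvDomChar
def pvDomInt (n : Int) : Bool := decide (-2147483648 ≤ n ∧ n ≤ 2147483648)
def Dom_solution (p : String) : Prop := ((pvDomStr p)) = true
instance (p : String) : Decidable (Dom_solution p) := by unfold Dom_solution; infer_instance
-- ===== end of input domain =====

-- B replaces A's recursion by an iterative loop with two accumulators (simpler control flow, same cost).

-- ===== PORT A =====
-- split_u_v's for-loop: returns the first index i where the two counters meet
def splitLoopA : List Char → Int → Int → Nat → Option Nat
  | [], _, _, _ => none
  | c :: rest, co, cc, i =>
    let co' := if c = '(' then co + 1 else co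
    let cc' := if c = '(' then cc else cc + 1
    if co' = cc' then some i else splitLoopA rest co' cc' (i + 1)

def split_u_v (p : List Char) : List Char × List Char :=
  if p = [] then ([], [])
  else
    match splitLoopA p 0 0 0 with
    | some i => (p.take (i + 1), p.drop (i + 1))
    | none => ([], [])

def isCorrectLoop : List Char → Int → Bool
  | [], count => decide (count = 0)
  | c :: rest, count =>
    if c = '(' then isCorrectLoop rest (count + 1)
    else if count = 0 then false else isCorrectLoop rest (count - 1)

def is_correct (p : List Char) : Bool :=
  if p = [] then true else isCorrectLoop p 0

def get_bet_rev (p : List Char) : List Char :=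
  if p = [] then p
  else if p.length > 2 then
    (PySem.List.pyRange 1 ((p.length : Int) - 1) 1).foldl
      (fun res i => res ++ [if PySem.List.pyGetD p i ' ' = '(' then ')' else '(']) []
  else []

lemma split_snd_lt (p : List Char) (h : p ≠ []) : (split_u_v p).2.length < p.length := by
  unfold split_u_v
  rw [if_neg h]
  cases splitLoopA p 0 0 0 with
  | none => simpa using List.length_pos_iff.mpr h
  | some i =>
    simp only [List.length_drop]
    have := List.length_pos_iff.mpr h
    omega

def solutionCore (p : List Char) : List Char :=
  if h : p = [] then p
  else
    let uv := split_u_v p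
    if is_correct uv.1 then uv.1 ++ solutionCore uv.2
    else ('(' :: solutionCore uv.2) ++ ')' :: get_bet_rev uv.1
termination_by p.length
decreasing_by all_goals exact split_snd_lt p h

def solution (p : String) : String := String.ofList (solutionCore p.toList)

-- ===== PORT B =====
-- B's prefix split: one running balance
def splitLoopB : List Char → Int → Nat → Option Nat
  | [], _, _ => none
  | c :: rest, bal, i =>
    let bal' := bal + (if c = '(' then 1 else -1)
    if bal' = 0 then some i else splitLoopB rest bal' (i + 1)

def bSplit (p : List Char) : List Char × List Char :=
  match splitLoopB p 0 0 with
  | some i => (p.take (i + 1), p.drop (i + 1))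
  | none => ([], [])

-- B's correctness scan: (balance, ok) state
def bBalLoop : List Char → Int → Bool → Int × Bool
  | [], bal, ok => (bal, ok)
  | c :: rest, bal, ok =>
    let bal' := bal + (if c = '(' then 1 else -1)
    bBalLoop rest bal' (ok && decide (0 ≤ bal'))

def bBalanced (u : List Char) : Bool :=
  let r := bBalLoop u 0 true
  r.2 && decide (r.1 = 0)

-- ''.join(')' if c == '(' else '(' for c in u[1:-1])
def bInnerRev (u : List Char) : List Char :=
  (PySem.List.slice u (some 1) (some (-1))).map (fun c => if c = '(' then ')' else '(')

lemma bsplit_snd_lt (p : List Char) (h : p ≠ []) : (bSplit p).2.length < p.length := by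
  unfold bSplit
  cases splitLoopB p 0 0 with
  | none => simpa using List.length_pos_iff.mpr h
  | some i =>
    simp only [List.length_drop]
    have := List.length_pos_iff.mpr h
    omega

def bLoop (p left right : List Char) : List Char :=
  if h : p = [] then left ++ right
  else
    let uv := bSplit p
    if bBalanced uv.1 then bLoop uv.2 (left ++ uv.1) right
    else bLoop uv.2 (left ++ ['(']) ((')' :: bInnerRev uv.1) ++ right)
termination_by p.length
decreasing_by all_goals exact bsplit_snd_lt p h

def solution_alt (p : String) : String := String.ofList (bLoop p.toList [] [])

-- ===== PRECONDITION & SPEC =====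
def Spec_solution (p : String) (out : String) : Prop := out = solution_alt p
instance (p : String) (out : String) : Decidable (Spec_solution p out) := by unfold Spec_solution; infer_instance

-- ===== CLAIM (what is proved, stated in full; the proofs are below) =====
def Claim_equal_solution : Prop := ∀ (p : String), Dom_solution p → Spec_solution p (solution p)

-- ===== LEMMAS AND PROOFS =====

lemma splitLoop_eq (l : List Char) : ∀ (co cc : Int) (i : Nat),
    splitLoopA l co cc i = splitLoopB l (co - cc) i := by
  induction l with
  | nil => intros; rfl
  | cons c rest ih =>
    intro co cc i
    simp only [splitLoopA, splitLoopB]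
    by_cases hc : c = '('
    · simp only [if_pos hc]
      by_cases he : co + 1 = cc
      · rw [if_pos he, if_pos (show co - cc + 1 = (0:Int) by omega)]
      · rw [if_neg he, if_neg (show ¬ co - cc + 1 = (0:Int) by omega), ih,
          show co + 1 - cc = co - cc + 1 from by ring]
    · simp only [if_neg hc]
      by_cases he : co = cc + 1
      · rw [if_pos he, if_pos (show co - cc + -1 = (0:Int) by omega)]
      · rw [if_neg he, if_neg (show ¬ co - cc + -1 = (0:Int) by omega), ih,
          show co - (cc + 1) = co - cc + -1 from by ring]

lemma split_eq (p : List Char) : bSplit p = split_u_v p := by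
  unfold bSplit split_u_v
  by_cases h : p = []
  · subst h; rfl
  · rw [if_neg h, splitLoop_eq p 0 0 0, show (0:Int) - 0 = 0 from by ring]

lemma bBalLoop_false (l : List Char) : ∀ bal, (bBalLoop l bal false).2 = false := by
  induction l with
  | nil => intro bal; rfl
  | cons c rest ih => intro bal; simp only [bBalLoop, Bool.false_and]; exact ih _

lemma isCorrect_eq_bal (l : List Char) : ∀ (count : Int), 0 ≤ count →
    isCorrectLoop l count =
      ((bBalLoop l count true).2 && decide ((bBalLoop l count true).1 = 0)) := by
  induction l with
  | nil => intro count _; simp [isCorrectLoop, bBalLoop]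
  | cons c rest ih =>
    intro count hc
    by_cases hch : c = '('
    · simp only [isCorrectLoop, bBalLoop, if_pos hch]
      have h0 : (true && decide (0 ≤ count + 1)) = true := by
        simp; omega
      rw [h0]
      exact ih (count + 1) (by omega)
    · simp only [isCorrectLoop, bBalLoop, if_neg hch]
      by_cases he : count = 0
      · subst he
        rw [if_pos rfl]
        have : (true && decide ((0:Int) ≤ 0 + -1)) = false := by decide
        rw [this, bBalLoop_false]
        simp
      · simp only [if_neg he]
        have h0 : (true && decide (0 ≤ count + -1)) = true := by
          simp; omega
        rw [h0, show count + (-1:Int) = count - 1 by ring]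
        exact ih (count - 1) (by omega)

lemma balanced_eq (u : List Char) : bBalanced u = is_correct u := by
  unfold bBalanced is_correct
  by_cases h : u = []
  · subst h; rfl
  · rw [if_neg h, isCorrect_eq_bal u 0 le_rfl]

lemma slice_interior (u : List Char) :
    PySem.List.slice u (some 1) (some (-1)) = (u.drop 1).take (u.length - 2) := by
  cases u with
  | nil => simp [PySem.List.slice]
  | cons c l => simp [PySem.List.slice]

lemma innerRev_eq (u : List Char) : bInnerRev u = get_bet_rev u := by
  unfold bInnerRev get_bet_rev
  by_cases h : u = []
  · subst h; rfl
  · rw [if_neg h]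
    by_cases h2 : u.length > 2
    · rw [if_pos h2, PySem.List.foldl_append_singleton_eq_map, List.nil_append,
        PySem.List.pyRange_one, List.map_map, slice_interior,
        show ((u.length : Int) - 1 - 1).toNat = u.length - 2 from by omega]
      apply List.ext_getElem
      · simp; omega
      · intro n h1 h2'
        simp only [List.getElem_map, List.getElem_range]
        have hn : n < u.length - 2 := by simp at h1; omega
        rw [List.getElem_take, List.getElem_drop]
        simp only [Function.comp_apply]
        rw [show ((1 : Int) + (n : Int)) = (((1 + n : Nat)) : Int) from by push_cast; ring,
          PySem.List.pyGetD_natCast]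
        rw [List.getD_eq_getElem?_getD, List.getElem?_eq_getElem (by omega)]
        simp [Nat.add_comm]
    · rw [if_neg h2, slice_interior,
        show u.length - 2 = 0 from by omega]
      simp

lemma bLoop_eq (n : Nat) : ∀ (p left right : List Char), p.length ≤ n →
    bLoop p left right = left ++ solutionCore p ++ right := by
  induction n with
  | zero =>
    intro p left right hn
    have hp : p = [] := by
      cases p with
      | nil => rfl
      | cons a l => simp at hn
    subst hp
    rw [bLoop, solutionCore]
    simp
  | succ n ih =>
    intro p left right hn
    by_cases hp : p = []
    · subst hp; rw [bLoop, solutionCore]; simp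
    · rw [bLoop, solutionCore]
      simp only [dif_neg hp]
      rw [split_eq, balanced_eq]
      have hlt : (split_u_v p).2.length ≤ n := by
        have := split_snd_lt p hp
        omega
      by_cases hc : is_correct (split_u_v p).1 = true
      · rw [if_pos hc, if_pos hc, ih _ _ _ hlt]
        simp [List.append_assoc]
      · rw [if_neg hc, if_neg hc, innerRev_eq, ih _ _ _ hlt]
        simp [List.append_assoc]

-- ===== VERDICT (by name: the statement is the Claim_ definition above) =====
theorem solution_spec : Claim_equal_solution := by
  intro p _
  unfold Spec_solution solution solution_alt
  rw [bLoop_eq p.toList.length p.toList [] [] le_rfl]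
  simp
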